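-- pv_equiv track=rewrite | github.com/hhheegunnn/Algorithm_Study | boj_implementation/G/G4/17779/Re_boj_G4_17779_Heegun.py | sum_1D
-- ===== SOURCE A (Python) =====
-- def sum_1D(graph, x, y, d1, d2):
--     sum_1 = 0
--     for i in range(0, x+d1):
--         for j in range(0, y+1):
--             sum_1 = sum_1 + graph[i][j]
--     #5구역에 해당하는 곳 제외
--     t = -1
--     for i in range(x, x+d1):
--         t = t+1
--         for j in range(y-t,y+1):
--             sum_1 = sum_1 - graph[i][j]
--     return sum_1
-- ===== SOURCE B (Python) =====
-- def sum_1D(graph, x, y, d1, d2):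
--     total = 0
--     for i in range(0, x + d1):
--         hi = y if i < x else y - (i - x) - 1
--         for j in range(0, hi + 1):
--             total = total + graph[i][j]
--     return total
-- ===== Notes on version B (the rewrite author's own statement) =====
-- stated objective: simpler
-- what changed: Replaces A's two passes (add the full rectangle, then re-traverse the last d1 rows subtracting the triangular corner) by one fused double loop that computes a per-row column bound and adds each needed cell exactly once. Pre_ restricts to the problem's natural domain (0 <= x, 0 <= y, 0 <= d1 <= y+1, all accessed cells present); outside it A either raises IndexError or, when d1 > y+1, its subtraction loop uses negative column indices that wrap to the ends of rows, an accident of Python indexing that B does not mimic.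
-- outside the precondition, e.g. on sum_1D([[1, 2], [3, 4], [5, 6]], 0, 0, 3, 0): A returns -15, B returns 0
import Mathlib
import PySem

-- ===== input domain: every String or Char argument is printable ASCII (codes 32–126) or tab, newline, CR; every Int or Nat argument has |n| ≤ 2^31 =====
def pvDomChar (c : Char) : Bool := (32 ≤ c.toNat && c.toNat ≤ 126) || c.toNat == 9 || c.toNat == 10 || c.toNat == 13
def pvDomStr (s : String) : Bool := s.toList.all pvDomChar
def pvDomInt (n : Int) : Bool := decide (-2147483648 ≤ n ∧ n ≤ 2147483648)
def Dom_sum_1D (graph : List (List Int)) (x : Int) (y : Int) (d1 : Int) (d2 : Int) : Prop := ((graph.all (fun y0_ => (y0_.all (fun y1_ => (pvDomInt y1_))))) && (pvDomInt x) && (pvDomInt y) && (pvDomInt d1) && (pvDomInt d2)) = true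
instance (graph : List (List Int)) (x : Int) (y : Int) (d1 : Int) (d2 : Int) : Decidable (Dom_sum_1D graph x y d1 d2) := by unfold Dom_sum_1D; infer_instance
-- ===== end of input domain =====

-- B fuses A's add-rectangle-then-subtract-triangle passes into one double loop with a
-- per-row column bound (equality proved on Pre_; the return value only — neither mutates).

-- graph[i][j]: under Pre_ both indices are nonnegative and in range, so the default is never used
def pvCell (graph : List (List Int)) (i j : Int) : Int :=
  PySem.List.pyGetD (PySem.List.pyGetD graph i []) j 0

-- ===== PORT A =====
def sum_1D (graph : List (List Int)) (x : Int) (y : Int) (d1 : Int) (d2 : Int) : Int :=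
  -- first loop: add the rectangle rows 0..x+d1-1, columns 0..y
  let sum1 := (PySem.List.pyRange 0 (x + d1) 1).foldl
    (fun s i => (PySem.List.pyRange 0 (y + 1) 1).foldl
      (fun s j => s + pvCell graph i j) s) 0
  -- second loop: t starts at -1, subtract columns y-t..y of rows x..x+d1-1
  let r := (PySem.List.pyRange x (x + d1) 1).foldl
    (fun (p : Int × Int) i =>
      let t := p.1 + 1
      (t, (PySem.List.pyRange (y - t) (y + 1) 1).foldl
        (fun s j => s - pvCell graph i j) p.2))
    (-1, sum1)
  r.2

-- ===== PORT B =====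
def sum_1D_alt (graph : List (List Int)) (x : Int) (y : Int) (d1 : Int) (d2 : Int) : Int :=
  (PySem.List.pyRange 0 (x + d1) 1).foldl
    (fun total i =>
      let hi := if i < x then y else y - (i - x) - 1
      (PySem.List.pyRange 0 (hi + 1) 1).foldl
        (fun total j => total + pvCell graph i j) total) 0

-- ===== PRECONDITION & SPEC =====
-- Pre_ is the problem's natural domain plus the degenerate no-subtraction cases: either d1 ≤ 0
-- (the subtraction loop is empty) or 0 ≤ x, 0 ≤ y and the triangular corner fits (d1 ≤ y+1); and
-- every cell the addition loop touches is present. Outside it A raises IndexError or reaches cells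
-- through negative-index wraparound (x < 0, y < 0 or d1 > y+1 with a nonempty subtraction loop) —
-- an accident of Python indexing that B does not mimic.
def Pre_sum_1D (graph : List (List Int)) (x : Int) (y : Int) (d1 : Int) (d2 : Int) : Prop :=
  (d1 ≤ 0 ∨ (0 ≤ x ∧ 0 ≤ y ∧ d1 ≤ y + 1)) ∧
  (x + d1 ≤ 0 ∨ y + 1 ≤ 0 ∨
    ((x + d1).toNat ≤ graph.length ∧
      ∀ row ∈ graph.take (x + d1).toNat, y + 1 ≤ (row.length : Int)))
instance (graph : List (List Int)) (x : Int) (y : Int) (d1 : Int) (d2 : Int) : Decidable (Pre_sum_1D graph x y d1 d2) := by unfold Pre_sum_1D; infer_instance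

def pvWitness_sum_1D : List (List Int) × Int × Int × Int × Int :=
  ([[1, 2, 3], [4, 5, 6], [7, 8, 9]], 1, 1, 2, 0)

def Spec_sum_1D (graph : List (List Int)) (x : Int) (y : Int) (d1 : Int) (d2 : Int) (out : Int) : Prop := out = sum_1D_alt graph x y d1 d2
instance (graph : List (List Int)) (x : Int) (y : Int) (d1 : Int) (d2 : Int) (out : Int) : Decidable (Spec_sum_1D graph x y d1 d2 out) := by unfold Spec_sum_1D; infer_instance

-- ===== CLAIM (what is proved, stated in full; the proofs are below) =====
def Claim_equal_sum_1D : Prop := ∀ (graph : List (List Int)) (x : Int) (y : Int) (d1 : Int) (d2 : Int), Dom_sum_1D graph x y d1 d2 → Pre_sum_1D graph x y d1 d2 → Spec_sum_1D graph x y d1 d2 (sum_1D graph x y d1 d2)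

-- ===== LEMMAS AND PROOFS =====

-- a subtracting fold is the start minus the sum
theorem pv_foldl_sub (f : Int → Int) (l : List Int) (a : Int) :
    l.foldl (fun s j => s - f j) a = a - (l.map f).sum := by
  induction l generalizing a with
  | nil => simp
  | cons h t ih => simp [List.foldl_cons, ih]; ring

-- row sum of B for a row i, as a map-sum
def pvRowB (graph : List (List Int)) (x y : Int) (i : Int) : Int :=
  ((PySem.List.pyRange 0 ((if i < x then y else y - (i - x) - 1) + 1) 1).map (pvCell graph i)).sum

theorem pv_B_eq_sum (graph : List (List Int)) (x y d1 d2 : Int) :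
    sum_1D_alt graph x y d1 d2
      = ((PySem.List.pyRange 0 (x + d1) 1).map (pvRowB graph x y)).sum := by
  unfold sum_1D_alt pvRowB
  induction (PySem.List.pyRange 0 (x + d1) 1) using List.reverseRecOn with
  | nil => simp
  | append_singleton l e ih =>
      simp [List.foldl_append, List.map_append, PySem.List.foldl_add]

-- A's first loop, as a map-sum
theorem pv_A1_eq_sum (graph : List (List Int)) (x y d1 : Int) :
    (PySem.List.pyRange 0 (x + d1) 1).foldl
      (fun s i => (PySem.List.pyRange 0 (y + 1) 1).foldl
        (fun s j => s + pvCell graph i j) s) 0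
    = ((PySem.List.pyRange 0 (x + d1) 1).map
        (fun i => ((PySem.List.pyRange 0 (y + 1) 1).map (pvCell graph i)).sum)).sum := by
  induction (PySem.List.pyRange 0 (x + d1) 1) using List.reverseRecOn with
  | nil => simp
  | append_singleton l e ih =>
      simp [List.foldl_append, List.map_append, PySem.List.foldl_add]

-- A's second loop: invariant — t tracks i - x; result subtracts the triangle sums
theorem pv_A2_eq (graph : List (List Int)) (x y : Int) :
    ∀ (n : Nat) (a s0 : Int),
      (PySem.List.pyRange a (a + n) 1).foldl
        (fun (p : Int × Int) i =>
          (p.1 + 1, (PySem.List.pyRange (y - (p.1 + 1)) (y + 1) 1).foldl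
            (fun s j => s - pvCell graph i j) p.2))
        (a - x - 1, s0)
      = (a - x - 1 + n,
         s0 - ((PySem.List.pyRange a (a + n) 1).map
                 (fun i => ((PySem.List.pyRange (y - (i - x)) (y + 1) 1).map (pvCell graph i)).sum)).sum) := by
  intro n
  induction n with
  | zero => intro a s0; simp [PySem.List.pyRange_one_eq_nil]
  | succ m ih =>
      intro a s0
      have hcons : PySem.List.pyRange a (a + (m + 1 : Nat)) 1
          = a :: PySem.List.pyRange (a + 1) (a + (m + 1 : Nat)) 1 :=
        PySem.List.pyRange_one_cons (by omega)
      have harg : (a : Int) + ((m : Nat) + 1 : Nat) = (a + 1) + (m : Nat) := by push_cast; ring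
      rw [hcons, List.foldl_cons, List.map_cons]
      have h1 : a - x - 1 + 1 = a - x := by ring
      simp only [h1, harg]
      rw [pv_foldl_sub]
      have hih := ih (a + 1) (s0 - ((PySem.List.pyRange (y - (a - x)) (y + 1) 1).map (pvCell graph a)).sum)
      rw [show (a : Int) + 1 - x - 1 = a - x from by ring] at hih
      rw [hih, List.sum_cons, Prod.mk.injEq]
      constructor
      · push_cast; ring
      · ring

-- specialised to the actual start state (-1, s0) and a = x
theorem pv_A2_eq' (graph : List (List Int)) (x y : Int) (n : Nat) (s0 : Int) :
    (PySem.List.pyRange x (x + n) 1).foldl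
        (fun (p : Int × Int) i =>
          (p.1 + 1, (PySem.List.pyRange (y - (p.1 + 1)) (y + 1) 1).foldl
            (fun s j => s - pvCell graph i j) p.2))
        (-1, s0)
      = (-1 + (n : Int),
         s0 - ((PySem.List.pyRange x (x + n) 1).map
                 (fun i => ((PySem.List.pyRange (y - (i - x)) (y + 1) 1).map (pvCell graph i)).sum)).sum) := by
  have h := pv_A2_eq graph x y n x s0
  rw [show x - x - 1 = (-1 : Int) from by ring] at h
  exact h

-- per-row identity: for x ≤ i the B-row plus the triangle slice is the full row 0..y
theorem pv_row_split (graph : List (List Int)) (x y : Int) (i : Int)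
    (hx : x ≤ i) (ht : i - x ≤ y) :
    ((PySem.List.pyRange 0 (y + 1) 1).map (pvCell graph i)).sum
      = pvRowB graph x y i
        + ((PySem.List.pyRange (y - (i - x)) (y + 1) 1).map (pvCell graph i)).sum := by
  have hsplit := PySem.List.pyRange_one_append 0 (y - (i - x)) (y + 1) (by omega) (by omega)
  rw [hsplit, List.map_append, List.sum_append]
  unfold pvRowB
  rw [if_neg (by omega)]
  have : y - (i - x) - 1 + 1 = y - (i - x) := by ring
  rw [this]

theorem sum_1D_eq_alt (graph : List (List Int)) (x y d1 d2 : Int)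
    (h : d1 ≤ 0 ∨ (0 ≤ x ∧ 0 ≤ y ∧ d1 ≤ y + 1)) :
    sum_1D graph x y d1 d2 = sum_1D_alt graph x y d1 d2 := by
  by_cases hd0 : d1 ≤ 0
  · -- d1 ≤ 0: the subtraction loop is empty and every row of B lies below x
    unfold sum_1D
    dsimp only
    rw [pv_A1_eq_sum, pv_B_eq_sum,
      PySem.List.pyRange_one_eq_nil (show x + d1 ≤ x from by omega), List.foldl_nil]
    refine congrArg List.sum (List.map_congr_left ?_)
    intro i hi
    have hm := (PySem.List.mem_pyRange_one).1 hi
    unfold pvRowB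
    rw [if_pos (show i < x from by omega)]
  · obtain ⟨hx, hy, hdy⟩ := h.resolve_left hd0
    have hd : 0 ≤ d1 := by omega
    unfold sum_1D
    dsimp only
    rw [pv_A1_eq_sum, pv_B_eq_sum]
    rw [show x + d1 = x + (d1.toNat : Nat) from by push_cast; omega]
    rw [pv_A2_eq' graph x y d1.toNat]
    simp only
    -- split both outer ranges at x
    have hOsplit := PySem.List.pyRange_one_append 0 x (x + (d1.toNat : Nat)) (by omega) (by push_cast; omega)
    rw [hOsplit, List.map_append, List.sum_append, List.map_append, List.sum_append]
    -- rows below x agree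
    have hlow : ∀ i ∈ PySem.List.pyRange 0 x 1,
        ((PySem.List.pyRange 0 (y + 1) 1).map (pvCell graph i)).sum = pvRowB graph x y i := by
      intro i hi
      have := (PySem.List.mem_pyRange_one).1 hi
      unfold pvRowB
      rw [if_pos (by omega)]
    rw [List.map_congr_left hlow]
    -- rows ≥ x: full = B-row + triangle
    have hhigh : ∀ i ∈ PySem.List.pyRange x (x + (d1.toNat : Nat)) 1,
        ((PySem.List.pyRange 0 (y + 1) 1).map (pvCell graph i)).sum
          = pvRowB graph x y i
            + ((PySem.List.pyRange (y - (i - x)) (y + 1) 1).map (pvCell graph i)).sum := by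
      intro i hi
      have hm := (PySem.List.mem_pyRange_one).1 hi
      have hm2 : i < x + (d1.toNat : Int) := by exact_mod_cast hm.2
      exact pv_row_split graph x y i hm.1 (by omega)
    rw [List.map_congr_left hhigh]
    rw [List.sum_map_add]
    ring

-- ===== VERDICT (by name: the statement is the Claim_ definition above) =====
theorem sum_1D_spec : Claim_equal_sum_1D := by
  intro graph x y d1 d2 _hdom hpre
  unfold Spec_sum_1D
  exact sum_1D_eq_alt graph x y d1 d2 hpre.1
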